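-- pv_equiv track=rewrite | github.com/FacundoGazar/Taller-de-Tecnologias-de-Prod-Soft---Opci-n-T-cnicas-y-Estrategias | Spiderman and Jumping/challenge.py | minimal_energy
-- ===== SOURCE A (Python) =====
-- from math import log2
--
-- def minimal_energy(N, heights):
--     '''
--         Calcula el costo minimo de energia entre saltos que pesan para indices que son **2
--     '''
--     DP = [10 ** 9] * N   # Ponemos que el valor minimo de todas las posiciones es el valor maximo de las alturas segun el ejercicio
--     DP[0] = 0   # El primero es cero pq ya estamos ahi
--
--     for index in range(1, N):
--         iterations = int(log2(index) + 1) # Este coso calcula cuantas potencias de 2 hay para index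
--
--         # Aca saltamos por cada potencia
--         for k in range(iterations):
--             i = index - 2 ** k
--
--             if i >= 0:
--                 new_cost = DP[i] + abs(heights[i] - heights[index])
--                 DP[index] = min(DP[index], new_cost)    #Actualizo el costo mínimo para llegar al edificio actual
--
--     return DP[N - 1]  # El costo mínimo queda guardado en DP[N-1]
-- ===== SOURCE B (Python) =====
-- def _preds(t):
--     # power-of-two predecessors of node t, nearest first
--     ps = []
--     p2 = 1
--     while p2 <= t:
--         ps.append(t - p2)
--         p2 *= 2
--     return ps
--
-- def minimal_energy(N, heights):
--     # Top-down memoized evaluation with an explicit DFS stack, demand-driven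
--     # from node N-1, instead of a bottom-up DP table filled in index order.
--     memo = {0: 0}
--     stack = [(N - 1, False)]
--     while stack:
--         t, ready = stack.pop()
--         if t in memo:
--             continue
--         if ready:
--             memo[t] = min([10 ** 9] + [memo[p] + abs(heights[p] - heights[t]) for p in _preds(t)])
--         else:
--             stack.append((t, True))
--             stack.extend((p, False) for p in _preds(t) if p not in memo)
--     return memo[N - 1]
-- ===== Notes on version B (the rewrite author's own statement) =====
-- stated objective: alternative
-- what changed: Replaces A's bottom-up DP table filled in increasing index order (with a math.log2-counted inner scan of predecessors) by demand-driven top-down memoization: an explicit DFS stack of (node, ready) frames starting from node N-1, a memo dict, and each node's value computed as a min over its power-of-two predecessors only once all of them are memoized.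
-- outside the precondition, e.g. on minimal_energy(1, []): A returns 0, B returns 0
import Mathlib
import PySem

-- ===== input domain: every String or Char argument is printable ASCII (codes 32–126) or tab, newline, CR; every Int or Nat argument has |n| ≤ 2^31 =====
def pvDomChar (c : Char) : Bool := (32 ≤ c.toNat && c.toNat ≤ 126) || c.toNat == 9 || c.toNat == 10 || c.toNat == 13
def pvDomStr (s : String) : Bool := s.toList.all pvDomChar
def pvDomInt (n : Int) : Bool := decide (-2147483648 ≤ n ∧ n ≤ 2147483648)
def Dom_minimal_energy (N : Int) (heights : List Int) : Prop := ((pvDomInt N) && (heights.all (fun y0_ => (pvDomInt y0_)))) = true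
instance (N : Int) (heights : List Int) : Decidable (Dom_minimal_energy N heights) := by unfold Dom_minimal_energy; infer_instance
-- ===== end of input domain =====

-- B replaces A's bottom-up DP table (filled in increasing index order, inner scan
-- counted with math.log2) by demand-driven top-down memoization: an explicit DFS
-- stack of (node, ready) frames from node N-1 and a memo dict (objective: alternative).

-- ===== PORT A =====
def minimal_energy (N : Int) (heights : List Int) : Int :=
  -- DP = [10**9]*N ; DP[0] = 0  (for N ≤ 0 Python raises IndexError here — excluded by Pre_)
  let DP : List Int := (List.replicate N.toNat ((10:Int)^9)).set 0 0
  let DP := (PySem.List.pyRange 1 N 1).foldl (fun DP index =>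
    -- iterations = int(log2(index) + 1): the float log2 yields exactly
    -- Nat.log2 index + 1 for every 1 ≤ index ≤ 2^31 (the Dom range); exact there.
    (List.range (Nat.log2 index.toNat + 1)).foldl (fun DP k =>
      let i : Int := index - 2 ^ k
      if 0 ≤ i then
        let newCost := PySem.List.pyGetD DP i 0 +
          |PySem.List.pyGetD heights i 0 - PySem.List.pyGetD heights index 0|
        PySem.List.pySetD DP index (min (PySem.List.pyGetD DP index 0) newCost)
      else DP) DP) DP
  PySem.List.pyGetD DP (N - 1) 0

-- ===== PORT B =====
-- small hand-written facts cited inside the loop definitions below (kept omega-free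
-- so the definition bodies stay small terms)
theorem pvDoublePos (p2 : Int) (hp : 0 < p2) : 0 < p2 * 2 := mul_pos hp zero_lt_two

theorem pvPredsDec (t p2 : Int) (hp : 0 < p2) (h : p2 ≤ t) :
    (t - p2 * 2 + 1).toNat < (t - p2 + 1).toNat :=
  (Int.toNat_lt_toNat (add_pos_of_nonneg_of_pos (sub_nonneg.mpr h) one_pos)).mpr
    (Int.add_lt_add_right
      (sub_lt_sub_left ((mul_two p2) ▸ lt_add_of_pos_left p2 hp) t) 1)

theorem pvToNatLtOfLt (p t : Int) (h0 : 0 ≤ p) (h1 : p < t) : p.toNat < t.toNat :=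
  (Int.toNat_lt_toNat (h0.trans_lt h1)).mpr h1

-- _preds(t): the `while p2 <= t` loop building [t-1, t-2, t-4, …]
def bPredsAux (t p2 : Int) (hp : 0 < p2) : List Int :=
  if h : p2 ≤ t then (t - p2) :: bPredsAux t (p2 * 2) (pvDoublePos p2 hp) else []
termination_by (t - p2 + 1).toNat
decreasing_by exact pvPredsDec t p2 hp h

def bPreds (t : Int) : List Int := bPredsAux t 1 Int.one_pos

-- every predecessor lies in [0, t) (used for the termination measure of pvWF)
theorem pvBPredsAuxMem (t p2 : Int) (hp : 0 < p2) :
    ∀ p ∈ bPredsAux t p2 hp, 0 ≤ p ∧ p < t := by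
  rw [bPredsAux]
  split
  case isTrue h =>
    intro p hmem
    rcases List.mem_cons.mp hmem with rfl | hmem
    · exact ⟨sub_nonneg.mpr h, sub_lt_self t hp⟩
    · exact pvBPredsAuxMem t (p2 * 2) (pvDoublePos p2 hp) p hmem
  case isFalse h =>
    intro p hmem
    exact absurd hmem (List.not_mem_nil)
termination_by (t - p2 + 1).toNat
decreasing_by exact pvPredsDec t p2 hp ‹p2 ≤ t›

theorem pvBPredsMem (t : Int) : ∀ p ∈ bPreds t, 0 ≤ p ∧ p < t :=
  pvBPredsAuxMem t 1 Int.one_pos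

-- ===== termination measure for the DFS-stack loop of B (proof infrastructure the
-- ===== port cites in its `termination_by`/`decreasing_by`; no part of B's algorithm) =====
-- weight of an unmemoized node: 2 plus the weights of its unmemoized predecessors
def pvWF (d : PySem.Dict Int Int) (t : Int) : Nat :=
  2 + ((((bPreds t).filter (fun p => !(d.contains p))).attach).map (fun p => pvWF d p.1)).sum
termination_by t.toNat
decreasing_by
  exact pvToNatLtOfLt p.1 t (pvBPredsMem t p.1 (List.mem_of_mem_filter p.2)).1
    (pvBPredsMem t p.1 (List.mem_of_mem_filter p.2)).2

theorem pvWFeq (d : PySem.Dict Int Int) (t : Int) :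
    pvWF d t = 2 + (((bPreds t).filter (fun p => !(d.contains p))).map (pvWF d)).sum := by
  rw [pvWF]
  congr 1
  rw [show (fun p : {x // x ∈ (bPreds t).filter (fun p => !(d.contains p))} => pvWF d p.1)
      = (pvWF d) ∘ Subtype.val from rfl, ← List.map_map, List.attach_map_subtype_val]

theorem pvWFpos (d : PySem.Dict Int Int) (t : Int) : 1 ≤ pvWF d t := by
  rw [pvWFeq]; exact le_trans one_le_two (Nat.le_add_right 2 _)

theorem pvFilterSub {α : Type} (p q : α → Bool) (hpq : ∀ a, p a = true → q a = true) :
    ∀ l : List α, List.Sublist (l.filter p) (l.filter q) := by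
  intro l
  induction l with
  | nil => simp
  | cons a l ih =>
    rw [List.filter_cons, List.filter_cons]
    by_cases hp : p a = true
    · rw [if_pos hp, if_pos (hpq a hp)]
      exact ih.cons₂ a
    · rw [if_neg hp]
      split
      · exact ih.cons a
      · exact ih

theorem pvSublistSum {l₁ l₂ : List Nat} (h : List.Sublist l₁ l₂) : l₁.sum ≤ l₂.sum := by
  induction h with
  | slnil => exact le_rfl
  | cons a _ ih => rw [List.sum_cons]; exact le_trans ih (Nat.le_add_left _ _)
  | cons₂ a _ ih => rw [List.sum_cons, List.sum_cons]; exact Nat.add_le_add_left ih a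

theorem pvWFmono (d d' : PySem.Dict Int Int)
    (hd : ∀ k, d.contains k = true → d'.contains k = true) :
    ∀ (n : Nat) (t : Int), t.toNat ≤ n → pvWF d' t ≤ pvWF d t := by
  intro n
  induction n with
  | zero =>
    intro t ht
    have ht0 : t ≤ 0 := Int.toNat_eq_zero.mp (Nat.le_zero.mp ht)
    have hnil : bPreds t = [] := by
      rw [bPreds, bPredsAux,
        dif_neg (fun hle => absurd (hle.trans ht0) (by decide))]
    rw [pvWFeq, pvWFeq, hnil]
    exact le_rfl
  | succ n ih =>
    intro t ht
    rw [pvWFeq, pvWFeq]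
    have h1 : ((((bPreds t).filter (fun p => !(d'.contains p))).map (pvWF d')).sum)
        ≤ (((bPreds t).filter (fun p => !(d'.contains p))).map (pvWF d)).sum := by
      apply List.sum_le_sum
      intro p hp
      have hm := pvBPredsMem t p (List.mem_of_mem_filter hp)
      exact ih p (Nat.lt_succ_iff.mp (lt_of_lt_of_le (pvToNatLtOfLt p t hm.1 hm.2) ht))
    have hsub : List.Sublist ((bPreds t).filter (fun p => !(d'.contains p)))
        ((bPreds t).filter (fun p => !(d.contains p))) := by
      apply pvFilterSub
      intro a ha
      simp only [Bool.not_eq_true'] at ha ⊢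
      by_contra hcontra
      rw [hd a (by revert hcontra; cases d.contains a <;> simp)] at ha
      exact absurd ha (by simp)
    have h2 := pvSublistSum (hsub.map (pvWF d))
    exact Nat.add_le_add_left (le_trans h1 h2) 2

def pvWEntry (d : PySem.Dict Int Int) (e : Int × Bool) : Nat :=
  if d.contains e.1 then 1 else if e.2 then 1 else pvWF d e.1

def pvPhi (d : PySem.Dict Int Int) (stack : List (Int × Bool)) : Nat :=
  (stack.map (pvWEntry d)).sum

theorem pvWEntryPos (d : PySem.Dict Int Int) (e : Int × Bool) : 1 ≤ pvWEntry d e := by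
  unfold pvWEntry
  split
  · exact le_rfl
  · split
    · exact le_rfl
    · exact pvWFpos d e.1

theorem pvWEntryMono (d d' : PySem.Dict Int Int)
    (hd : ∀ k, d.contains k = true → d'.contains k = true) (e : Int × Bool) :
    pvWEntry d' e ≤ pvWEntry d e := by
  unfold pvWEntry
  by_cases hc' : d'.contains e.1 = true
  · rw [if_pos hc']
    exact pvWEntryPos d e
  · have hc : ¬ d.contains e.1 = true := fun h => hc' (hd _ h)
    rw [if_neg hc', if_neg hc]
    split
    · exact le_rfl
    · exact pvWFmono d d' hd e.1.toNat e.1 le_rfl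

theorem pvPhiMono (d d' : PySem.Dict Int Int)
    (hd : ∀ k, d.contains k = true → d'.contains k = true) :
    ∀ stack, pvPhi d' stack ≤ pvPhi d stack := by
  intro stack
  induction stack with
  | nil => exact le_rfl
  | cons e rest ih =>
    simp only [pvPhi, List.map_cons, List.sum_cons] at *
    exact Nat.add_le_add (pvWEntryMono d d' hd e) ih

theorem pvPhiCons (d : PySem.Dict Int Int) (e : Int × Bool) (rest : List (Int × Bool)) :
    pvPhi d (e :: rest) = pvWEntry d e + pvPhi d rest := by
  simp [pvPhi]

-- the three step-decrease facts `bRun` cites in decreasing_by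
theorem pvDecPop (d : PySem.Dict Int Int) (t : Int) (b : Bool) (rest : List (Int × Bool)) :
    pvPhi d rest < pvPhi d ((t, b) :: rest) := by
  rw [pvPhiCons]
  exact Nat.lt_add_of_pos_left (pvWEntryPos d (t, b))

theorem pvDecInsert (d : PySem.Dict Int Int) (t v : Int) (rest : List (Int × Bool)) :
    pvPhi (d.insert t v) rest < pvPhi d ((t, true) :: rest) := by
  have h1 : pvPhi (d.insert t v) rest ≤ pvPhi d rest := by
    apply pvPhiMono
    intro k hk
    rw [PySem.Dict.contains_insert]
    simp [hk]
  rw [pvPhiCons]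
  have h2 : pvWEntry d (t, true) = 1 := by
    unfold pvWEntry
    split <;> rfl
  rw [h2]
  exact lt_of_le_of_lt h1 (lt_one_add _)

theorem pvDecPush (d : PySem.Dict Int Int) (t : Int) (rest : List (Int × Bool))
    (hc : ¬ d.contains t = true) :
    pvPhi d ((((bPreds t).filter (fun p => !(d.contains p))).map (fun p => (p, false))).reverse
        ++ (t, true) :: rest)
      < pvPhi d ((t, false) :: rest) := by
  have happ : ∀ l₁ l₂, pvPhi d (l₁ ++ l₂) = pvPhi d l₁ + pvPhi d l₂ := by
    intro l₁ l₂; simp [pvPhi]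
  rw [happ, pvPhiCons, pvPhiCons]
  have hE : pvPhi d ((((bPreds t).filter (fun p => !(d.contains p))).map
        (fun p => (p, false))).reverse)
      = (((bPreds t).filter (fun p => !(d.contains p))).map (pvWF d)).sum := by
    unfold pvPhi
    rw [List.map_reverse, List.sum_reverse, List.map_map]
    congr 1
    apply List.map_congr_left
    intro p hp
    have hpc : d.contains p = false := by
      have := List.of_mem_filter hp
      revert this
      cases d.contains p <;> simp
    simp [pvWEntry, hpc]
  have hwt : pvWEntry d (t, true) = 1 := by unfold pvWEntry; split <;> rfl
  have hwf : pvWEntry d (t, false) = pvWF d t := by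
    unfold pvWEntry
    rw [if_neg hc]
    simp
  rw [hE, hwt, hwf, pvWFeq]
  omega

-- the `while stack:` loop; Python's stack has its top at the END of the list, the
-- Lean model keeps the top at the HEAD (append = cons, extend = reversed-block cons)
def bRun (heights : List Int) (memo : PySem.Dict Int Int) :
    List (Int × Bool) → PySem.Dict Int Int
  | [] => memo
  | (t, ready) :: rest =>
    if hc : memo.contains t then
      bRun heights memo rest
    else if hr : ready then
      -- memo[t] = min([10**9] + [memo[p] + abs(heights[p]-heights[t]) for p in _preds(t)]):
      -- min of the nonempty list is the min-fold from its head 10**9; memo[p] and the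
      -- heights subscripts ported with getD — exact: the keys are present (proved below)
      -- and under Pre_ the indices are in range
      bRun heights (memo.insert t ((bPreds t).foldl (fun acc p =>
        min acc (memo.getD p 0 +
          |PySem.List.pyGetD heights p 0 - PySem.List.pyGetD heights t 0|)) ((10:Int)^9))) rest
    else
      bRun heights memo
        ((((bPreds t).filter (fun p => !(memo.contains p))).map (fun p => (p, false))).reverse
          ++ (t, true) :: rest)
termination_by stack => pvPhi memo stack
decreasing_by
  · exact pvDecPop memo t ready rest
  · rw [hr]; exact pvDecInsert memo t _ rest
  · rw [show ready = false from by simpa using hr]; exact pvDecPush memo t rest hc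

def minimal_energy_alt (N : Int) (heights : List Int) : Int :=
  -- memo = {0: 0}; stack = [(N-1, False)]; … ; return memo[N-1]
  -- (the final key N-1 is always present on termination — proved below — so getD is exact)
  (bRun heights (PySem.Dict.ofList [((0:Int), (0:Int))]) [(N - 1, false)]).getD (N - 1) 0

-- ===== PRECONDITION & SPEC =====
-- A raises IndexError when N ≤ 0 (DP[0] = 0 on an empty list) and when heights has
-- fewer than N entries (heights[index] in the loop); Pre_ excludes those inputs (only
-- N = 1 with empty heights is excluded although A returns 0 there, as B also does).
def Pre_minimal_energy (N : Int) (heights : List Int) : Prop :=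
  1 ≤ N ∧ N ≤ (heights.length : Int)
instance (N : Int) (heights : List Int) : Decidable (Pre_minimal_energy N heights) := by
  unfold Pre_minimal_energy; infer_instance

def pvWitness_minimal_energy : Int × List Int := (3, [1, 5, 2])

def Spec_minimal_energy (N : Int) (heights : List Int) (out : Int) : Prop := out = minimal_energy_alt N heights
instance (N : Int) (heights : List Int) (out : Int) : Decidable (Spec_minimal_energy N heights out) := by unfold Spec_minimal_energy; infer_instance

-- ===== CLAIM (what is proved, stated in full; the proofs are below) =====
def Claim_equal_minimal_energy : Prop := ∀ (N : Int) (heights : List Int), Dom_minimal_energy N heights → Pre_minimal_energy N heights → Spec_minimal_energy N heights (minimal_energy N heights)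

-- ===== LEMMAS AND PROOFS =====

def pvH (heights : List Int) (j : Nat) : Int := heights.getD j 0

def pvCost (heights : List Int) (i t : Nat) : Int := |pvH heights i - pvH heights t|

-- the common mathematical DP value: min over power-of-2 jumps, from initial 10^9
def dpS (heights : List Int) : Nat → Int
  | 0 => 0
  | t + 1 =>
    (List.range (Nat.log2 (t + 1) + 1)).foldl
      (fun acc k => min acc (dpS heights ((t + 1) - 2 ^ k) + pvCost heights ((t + 1) - 2 ^ k) (t + 1)))
      ((10:Int) ^ 9)
decreasing_by
  have : 1 ≤ 2 ^ k := Nat.one_le_two_pow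
  omega

-- getD over set, same / distinct index
theorem pvGetDSetSelf (xs : List Int) (i : Nat) (v : Int) (h : i < xs.length) :
    (xs.set i v).getD i 0 = v := by
  rw [List.getD_eq_getElem _ _ (by simpa using h)]; simp

theorem pvGetDSetNe (xs : List Int) (i j : Nat) (v : Int) (h : j ≠ i) :
    (xs.set i v).getD j 0 = xs.getD j 0 := by
  rcases Nat.lt_or_ge j xs.length with hj | hj
  · rw [List.getD_eq_getElem _ _ (by simpa using hj), List.getD_eq_getElem _ _ hj]
    simp [h.symm]
  · rw [List.getD_eq_default _ _ (by simpa using hj), List.getD_eq_default _ _ hj]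

theorem pvTwoPowLe {t k : Nat} (ht : 0 < t) (hk : k < Nat.log2 t + 1) : 2 ^ k ≤ t := by
  have hk' : k ≤ Nat.log2 t := Nat.lt_succ_iff.mp hk
  calc 2 ^ k ≤ 2 ^ Nat.log2 t := Nat.pow_le_pow_right (by norm_num) hk'
    _ ≤ t := Nat.log2_self_le (by omega)

-- ===== A side =====

def InvList (n : Nat) (f : Nat → Int) (DP : List Int) : Prop :=
  DP.length = n ∧ ∀ j < n, DP.getD j 0 = f j

-- repeated set-min at one position t, reading only other positions
theorem pvStepASet (t : Nat) (read : Nat → Nat) (hread : ∀ k, read k ≠ t) (c : Nat → Int) :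
    ∀ (l : List Nat) (DP : List Int), t < DP.length →
      l.foldl (fun DP k => DP.set t (min (DP.getD t 0) (DP.getD (read k) 0 + c k))) DP
        = DP.set t (l.foldl (fun acc k => min acc (DP.getD (read k) 0 + c k)) (DP.getD t 0)) := by
  intro l
  induction l with
  | nil =>
    intro DP ht
    rw [List.foldl_nil, List.foldl_nil, List.getD_eq_getElem _ _ ht, List.set_getElem_self]
  | cons k l ih =>
    intro DP ht
    rw [List.foldl_cons, ih _ (by simpa using ht)]
    rw [List.set_set]
    rw [pvGetDSetSelf _ _ _ ht]
    rw [List.foldl_cons]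
    congr 1
    apply PySem.List.foldl_congr_mem
    intro acc x _
    rw [pvGetDSetNe _ _ _ _ (hread x)]

-- one outer step of A establishes dp at target m+1
theorem pvStepAInv (heights : List Int) (n m : Nat) (DP : List Int) (hm : m + 1 < n)
    (hInv : InvList n (fun j => if j ≤ m then dpS heights j else (10:Int)^9) DP) :
    InvList n (fun j => if j ≤ m + 1 then dpS heights j else (10:Int)^9)
      ((List.range (Nat.log2 (m + 1) + 1)).foldl
        (fun DP k => DP.set (m + 1)
          (min (DP.getD (m + 1) 0)
            (DP.getD ((m + 1) - 2 ^ k) 0 + pvCost heights ((m + 1) - 2 ^ k) (m + 1)))) DP) := by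
  have hread : ∀ k : Nat, (m + 1) - 2 ^ k ≠ m + 1 := by
    intro k; have : 1 ≤ 2 ^ k := Nat.one_le_two_pow; omega
  rw [pvStepASet (m + 1) (fun k => (m + 1) - 2 ^ k) hread _ _ DP (hInv.1 ▸ hm)]
  constructor
  · rw [List.length_set, hInv.1]
  · intro j hj
    by_cases hjt : j = m + 1
    · subst hjt
      rw [pvGetDSetSelf _ _ _ (hInv.1 ▸ hj)]
      beta_reduce
      rw [if_pos le_rfl]
      have hstart : DP.getD (m + 1) 0 = (10:Int)^9 := by
        rw [hInv.2 _ hj]; beta_reduce; rw [if_neg (by omega)]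
      have hvals : ∀ k : Nat, DP.getD ((m + 1) - 2 ^ k) 0 = dpS heights ((m + 1) - 2 ^ k) := by
        intro k
        have h1 : 1 ≤ 2 ^ k := Nat.one_le_two_pow
        rw [hInv.2 _ (by omega)]; beta_reduce; rw [if_pos (by omega)]
      rw [hstart]
      conv_rhs => rw [dpS]
      apply PySem.List.foldl_congr_mem
      intro acc k _
      rw [hvals k]
    · rw [pvGetDSetNe _ _ _ _ hjt, hInv.2 _ hj]
      beta_reduce
      by_cases hle : j ≤ m
      · rw [if_pos hle, if_pos (by omega)]
      · rw [if_neg hle, if_neg (by omega)]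

-- the port's inner fold at index (t : Int) is the Nat-level set-min fold
theorem pvInnerAEq (heights : List Int) (idx : Int) (t : Nat) (hidx : idx = (t : Int))
    (ht : 1 ≤ t) (DP : List Int) :
    (List.range (Nat.log2 idx.toNat + 1)).foldl (fun DP k =>
      let i : Int := idx - 2 ^ k
      if 0 ≤ i then
        let newCost := PySem.List.pyGetD DP i 0 +
          |PySem.List.pyGetD heights i 0 - PySem.List.pyGetD heights idx 0|
        PySem.List.pySetD DP idx (min (PySem.List.pyGetD DP idx 0) newCost)
      else DP) DP
    = (List.range (Nat.log2 t + 1)).foldl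
        (fun DP k => DP.set t
          (min (DP.getD t 0) (DP.getD (t - 2 ^ k) 0 + pvCost heights (t - 2 ^ k) t))) DP := by
  subst hidx
  rw [Int.toNat_natCast]
  apply PySem.List.foldl_congr_mem
  intro DP' k hk
  have h2 : 2 ^ k ≤ t := pvTwoPowLe (by omega) (List.mem_range.mp hk)
  have hi : (t : Int) - 2 ^ k = ((t - 2 ^ k : Nat) : Int) := by push_cast [h2]; ring
  rw [hi]
  rw [if_pos (by positivity)]
  simp only [PySem.List.pyGetD_natCast, PySem.List.pySetD_natCast]
  rfl

-- A's outer fold maintains the invariant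
theorem pvOuterA (heights : List Int) (n : Nat) (hn : 1 ≤ n) :
    ∀ mm, mm < n →
    InvList n (fun j => if j ≤ mm then dpS heights j else (10:Int)^9)
      ((PySem.List.pyRange 1 (1 + (mm : Int)) 1).foldl (fun DP index =>
        (List.range (Nat.log2 index.toNat + 1)).foldl (fun DP k =>
          let i : Int := index - 2 ^ k
          if 0 ≤ i then
            let newCost := PySem.List.pyGetD DP i 0 +
              |PySem.List.pyGetD heights i 0 - PySem.List.pyGetD heights index 0|
            PySem.List.pySetD DP index (min (PySem.List.pyGetD DP index 0) newCost)
          else DP) DP)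
        ((List.replicate n ((10:Int)^9)).set 0 0)) := by
  intro mm
  induction mm with
  | zero =>
    intro _
    rw [show ((1 : Int) + ((0:Nat):Int) = 1) from by norm_num, PySem.List.pyRange_one_eq_nil le_rfl,
      List.foldl_nil]
    constructor
    · simp
    · intro j hj
      rcases Nat.eq_zero_or_pos j with rfl | hjpos
      · rw [pvGetDSetSelf _ _ _ (by simpa using hn)]
        beta_reduce
        rw [if_pos le_rfl]
        simp [dpS]
      · rw [pvGetDSetNe _ _ _ _ (by omega),
          List.getD_eq_getElem _ _ (by simpa using hj), List.getElem_replicate]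
        beta_reduce
        rw [if_neg (by omega)]
  | succ mm ih =>
    intro hmm
    have hsplit : (1 : Int) + ((mm : Nat) + 1 : Nat) = (1 + (mm : Int)) + 1 := by push_cast; ring
    rw [hsplit, PySem.List.pyRange_one_succ_right (by omega), List.foldl_append,
      List.foldl_cons, List.foldl_nil]
    rw [pvInnerAEq heights (1 + (mm : Int)) (mm + 1) (by push_cast; ring) (by omega)]
    exact pvStepAInv heights n mm _ hmm (ih (by omega))

-- A computes the dp value at N-1
theorem pvAeq (N : Int) (heights : List Int) (h1 : 1 ≤ N) :
    minimal_energy N heights = dpS heights (N - 1).toNat := by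
  obtain ⟨n, rfl⟩ : ∃ n : Nat, N = (n : Int) := ⟨N.toNat, by omega⟩
  have hn1 : 1 ≤ n := by exact_mod_cast h1
  simp only [minimal_energy, Int.toNat_natCast]
  have hA := pvOuterA heights n hn1 (n - 1) (by omega)
  have hAr : (1:Int) + ((n - 1 : Nat) : Int) = (n : Int) := by omega
  rw [hAr] at hA
  have hg : ((n : Int) - 1) = ((n - 1 : Nat) : Int) := by omega
  rw [hg, PySem.List.pyGetD_natCast, Int.toNat_natCast]
  rw [hA.2 (n - 1) (by omega)]
  beta_reduce
  rw [if_pos le_rfl]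

-- ===== B side =====

-- bPreds of a positive index, as the power-of-two range A also scans
theorem pvBPredsAuxEq (m : Nat) (hm : 1 ≤ m) (e : Nat) (p2 : Int) (hp : 0 < p2)
    (he : p2 = ((2 ^ e : Nat) : Int)) :
    bPredsAux (m : Int) p2 hp
      = (List.range' e (Nat.log2 m + 1 - e)).map (fun k => ((m - 2 ^ k : Nat) : Int)) := by
  rw [bPredsAux]
  split
  case isTrue h =>
    have h2 : 2 ^ e ≤ m := by rw [he] at h; exact_mod_cast h
    have hle : e ≤ Nat.log2 m := (Nat.le_log2 (by omega)).mpr h2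
    rw [show Nat.log2 m + 1 - e = (Nat.log2 m - e) + 1 from by omega, List.range'_succ,
      List.map_cons]
    congr 1
    · rw [he, Nat.cast_sub h2]
    · rw [show Nat.log2 m - e = Nat.log2 m + 1 - (e + 1) from by omega]
      exact pvBPredsAuxEq m hm (e + 1) (p2 * 2) (by omega) (by rw [he]; push_cast; ring)
  case isFalse h =>
    have hlt : m < 2 ^ e := by
      rw [he] at h
      by_contra hcon
      exact h (by exact_mod_cast Nat.le_of_not_lt (by omega))
    have : Nat.log2 m < e := (Nat.log2_lt (by omega)).mpr hlt
    rw [show Nat.log2 m + 1 - e = 0 from by omega]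
    rfl
termination_by ((m : Int) - p2 + 1).toNat
decreasing_by omega

theorem pvBPredsEq (m : Nat) (hm : 1 ≤ m) :
    bPreds (m : Int) = (List.range (Nat.log2 m + 1)).map (fun k => ((m - 2 ^ k : Nat) : Int)) := by
  rw [bPreds, pvBPredsAuxEq m hm 0 1 Int.one_pos (by norm_num), List.range_eq_range']
  rfl

-- B's min-fold at a positive node computes the dp value, given correct memo entries
theorem pvBestEq (heights : List Int) (d : PySem.Dict Int Int) (m : Nat) (hm : 1 ≤ m)
    (hv : ∀ p ∈ bPreds (m : Int), d.getD p 0 = dpS heights p.toNat) :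
    (bPreds (m : Int)).foldl (fun acc p =>
        min acc (d.getD p 0 +
          |PySem.List.pyGetD heights p 0 - PySem.List.pyGetD heights (m : Int) 0|)) ((10:Int)^9)
      = dpS heights m := by
  obtain ⟨t, rfl⟩ : ∃ t, m = t + 1 := ⟨m - 1, by omega⟩
  conv_rhs => rw [dpS]
  rw [pvBPredsEq _ hm, List.foldl_map]
  apply PySem.List.foldl_congr_mem
  intro acc k hk
  have hmem : ((t + 1 - 2 ^ k : Nat) : Int) ∈ bPreds ((t + 1 : Nat) : Int) := by
    rw [pvBPredsEq _ hm]
    exact List.mem_map.mpr ⟨k, hk, rfl⟩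
  rw [hv _ hmem, Int.toNat_natCast]
  simp only [PySem.List.pyGetD_natCast]
  rfl

-- safety invariant of the DFS stack: every ready frame's unmemoized predecessors
-- appear above it (S collects the nodes seen while scanning down from the top)
def Good (d : PySem.Dict Int Int) : List Int → List (Int × Bool) → Prop
  | _, [] => True
  | S, (t, b) :: rest =>
    (b = true → ∀ p ∈ bPreds t, d.contains p = true ∨ p ∈ S) ∧ Good d (t :: S) rest

theorem pvGoodMono (d d' : PySem.Dict Int Int) (S S' : List Int)
    (hd : ∀ k, d.contains k = true → d'.contains k = true)
    (hS : ∀ x ∈ S, x ∈ S' ∨ d'.contains x = true) :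
    ∀ l, Good d S l → Good d' S' l := by
  intro l
  induction l generalizing S S' with
  | nil => intro _; trivial
  | cons e rest ih =>
    obtain ⟨t, b⟩ := e
    intro hg
    refine ⟨?_, ?_⟩
    · intro hb p hp
      rcases hg.1 hb p hp with hcp | hps
      · exact Or.inl (hd p hcp)
      · rcases hS p hps with h | h
        · exact Or.inr h
        · exact Or.inl h
    · refine ih (t :: S) (t :: S') ?_ hg.2
      intro x hx
      rcases List.mem_cons.mp hx with rfl | hx
      · exact Or.inl (List.mem_cons_self)
      · rcases hS x hx with h | h
        · exact Or.inl (List.mem_cons_of_mem _ h)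
        · exact Or.inr h

-- a block of not-ready frames only contributes its nodes to the seen-set
theorem pvGoodFalses (d : PySem.Dict Int Int) :
    ∀ (E : List (Int × Bool)) (S : List Int) (l : List (Int × Bool)),
      (∀ e ∈ E, e.2 = false) →
      Good d ((E.map Prod.fst).reverse ++ S) l → Good d S (E ++ l) := by
  intro E
  induction E with
  | nil =>
    intro S l _ hg
    simpa using hg
  | cons e E ih =>
    obtain ⟨p, b⟩ := e
    intro S l hfalse hg
    have hb : b = false := hfalse (p, b) List.mem_cons_self
    subst hb
    refine ⟨(fun h => nomatch h), ?_⟩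
    apply ih (p :: S) l (fun e he => hfalse e (List.mem_cons_of_mem _ he))
    have : ((((p, false) :: E).map Prod.fst).reverse ++ S)
        = (E.map Prod.fst).reverse ++ (p :: S) := by
      simp
    rwa [this] at hg

-- main invariant lemma: bRun preserves memo-correctness, grows the memo, and ends
-- with every stacked node memoized
theorem pvBRunSoundAux (heights : List Int) :
    ∀ (n : Nat) (memo : PySem.Dict Int Int) (stack : List (Int × Bool)),
      pvPhi memo stack ≤ n →
      (∀ k v, memo.get? k = some v → ∃ m : Nat, k = (m : Int) ∧ v = dpS heights m) →
      memo.contains 0 = true →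
      Good memo [] stack →
      (∀ e ∈ stack, 0 ≤ e.1) →
      (∀ k, memo.contains k = true → (bRun heights memo stack).contains k = true) ∧
      (∀ k v, (bRun heights memo stack).get? k = some v →
        ∃ m : Nat, k = (m : Int) ∧ v = dpS heights m) ∧
      (∀ x, (∃ b, (x, b) ∈ stack) → (bRun heights memo stack).contains x = true) := by
  intro n
  induction n with
  | zero =>
    intro memo stack hn ha h0 hg hb
    match stack with
    | [] =>
      refine ⟨fun k hk => ?_, fun k v hv => ?_, fun x hx => ?_⟩
      · simpa [bRun] using hk
      · exact ha k v (by simpa [bRun] using hv)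
      · obtain ⟨b, hbx⟩ := hx
        simp at hbx
    | (t, ready) :: rest =>
      exfalso
      have hpos := pvWEntryPos memo (t, ready)
      rw [pvPhiCons] at hn
      omega
  | succ n ih =>
    intro memo stack hn ha h0 hg hb
    match stack with
    | [] =>
      refine ⟨fun k hk => ?_, fun k v hv => ?_, fun x hx => ?_⟩
      · simpa [bRun] using hk
      · exact ha k v (by simpa [bRun] using hv)
      · obtain ⟨b, hbx⟩ := hx
        simp at hbx
    | (t, ready) :: rest =>
    by_cases hc : memo.contains t = true
    · -- memo hit: pop
      have hg' : Good memo [] rest := by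
        refine pvGoodMono memo memo [t] [] (fun k h => h) ?_ rest hg.2
        intro x hx
        rcases List.mem_cons.mp hx with rfl | hx
        · exact Or.inr hc
        · simp at hx
      have hlt := pvDecPop memo t ready rest
      obtain ⟨c1, c2, c3⟩ := ih memo rest (by omega) ha h0 hg'
        (fun e he => hb e (List.mem_cons_of_mem _ he))
      have hrun : bRun heights memo ((t, ready) :: rest) = bRun heights memo rest := by
        rw [bRun, dif_pos hc]
      refine ⟨fun k hk => hrun ▸ c1 k hk, fun k v hv => c2 k v (hrun ▸ hv), ?_⟩
      intro x hx
      obtain ⟨b, hbx⟩ := hx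
      rcases List.mem_cons.mp hbx with heq | hbx
      · have hxt : x = t := congrArg Prod.fst heq
        subst hxt
        exact hrun ▸ c1 x hc
      · exact hrun ▸ c3 x ⟨b, hbx⟩
    · cases ready with
      | true =>
        -- compute: all predecessors are memoized (nothing is above this frame)
        have hpred : ∀ p ∈ bPreds t, memo.contains p = true := by
          intro p hp
          rcases hg.1 rfl p hp with h | h
          · exact h
          · simp at h
        obtain ⟨m, rfl, hm1⟩ : ∃ m : Nat, t = (m : Int) ∧ 1 ≤ m := by
          have ht0 : 0 ≤ t := hb (t, true) List.mem_cons_self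
          have htne : t ≠ 0 := fun h => hc (h ▸ h0)
          exact ⟨t.toNat, by omega, by omega⟩
        have hv : ∀ p ∈ bPreds ((m : Nat) : Int), memo.getD p 0 = dpS heights p.toNat := by
          intro p hp
          have hsome : (memo.get? p).isSome = true := by
            rw [← PySem.Dict.contains_eq_isSome_get?]; exact hpred p hp
          obtain ⟨v, hpv⟩ := Option.isSome_iff_exists.mp hsome
          obtain ⟨q, rfl, rfl⟩ := ha p v hpv
          rw [PySem.Dict.getD_of_get?_eq_some memo 0 hpv, Int.toNat_natCast]
        have hbest := pvBestEq heights memo m hm1 hv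
        set memo' := memo.insert (m : Int) ((bPreds ((m : Nat) : Int)).foldl (fun acc p =>
          min acc (memo.getD p 0 +
            |PySem.List.pyGetD heights p 0 - PySem.List.pyGetD heights ((m : Nat) : Int) 0|))
          ((10:Int)^9)) with hmemo'
        have hmono : ∀ k, memo.contains k = true → memo'.contains k = true := by
          intro k hk
          rw [hmemo', PySem.Dict.contains_insert]
          simp [hk]
        have ha' : ∀ k v, memo'.get? k = some v → ∃ q : Nat, k = (q : Int) ∧ v = dpS heights q := by
          intro k v hkv
          rw [hmemo', PySem.Dict.get?_insert] at hkv
          split at hkv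
          · rename_i hkm
            refine ⟨m, hkm, ?_⟩
            rw [hbest] at hkv
            exact (Option.some_injective _ hkv).symm
          · exact ha k v hkv
        have h0' : memo'.contains 0 = true := hmono 0 h0
        have hg' : Good memo' [] rest := by
          refine pvGoodMono memo memo' [(m : Int)] [] hmono ?_ rest hg.2
          intro x hx
          rcases List.mem_cons.mp hx with rfl | hx
          · exact Or.inr (by rw [hmemo']; exact PySem.Dict.contains_insert_self _ _ _)
          · simp at hx
        have hlt : pvPhi memo' rest < pvPhi memo (((m : Int), true) :: rest) :=
          pvDecInsert memo (m : Int) _ rest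
        obtain ⟨c1, c2, c3⟩ := ih memo' rest (by omega) ha' h0' hg'
          (fun e he => hb e (List.mem_cons_of_mem _ he))
        have hrun : bRun heights memo ((((m : Nat) : Int), true) :: rest)
            = bRun heights memo' rest := by
          rw [bRun, dif_neg hc, dif_pos rfl]
        refine ⟨fun k hk => hrun ▸ c1 k (hmono k hk), fun k v hv' => c2 k v (hrun ▸ hv'), ?_⟩
        intro x hx
        obtain ⟨b, hbx⟩ := hx
        rcases List.mem_cons.mp hbx with heq | hbx
        · have hxt : x = (m : Int) := congrArg Prod.fst heq
          subst hxt
          exact hrun ▸ c1 _ (by rw [hmemo']; exact PySem.Dict.contains_insert_self _ _ _)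
        · exact hrun ▸ c3 x ⟨b, hbx⟩
      | false =>
        -- expand: push the ready frame and the unmemoized predecessors above it
        set F := (bPreds t).filter (fun p => !(memo.contains p)) with hF
        set stack' := ((F.map (fun p => (p, false))).reverse ++ (t, true) :: rest :
          List (Int × Bool)) with hstack'
        have hgoodmid : Good memo F ((t, true) :: rest) := by
          refine ⟨?_, ?_⟩
          · intro _ p hp
            by_cases hcp : memo.contains p = true
            · exact Or.inl hcp
            · refine Or.inr ?_
              rw [hF]
              exact List.mem_filter.mpr ⟨hp, by simp [hcp]⟩
          · refine pvGoodMono memo memo [t] (t :: F) (fun k h => h) ?_ rest hg.2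
            intro x hx
            rcases List.mem_cons.mp hx with rfl | hx
            · exact Or.inl List.mem_cons_self
            · simp at hx
        have hg' : Good memo [] stack' := by
          rw [hstack']
          have hrev : ((F.map (fun p => (p, false))).reverse.map Prod.fst).reverse ++ ([] : List Int)
              = F := by
            simp only [List.map_reverse, List.reverse_reverse, List.map_map, List.append_nil]
            calc List.map (Prod.fst ∘ fun p => (p, false)) F
                = List.map id F := List.map_congr_left (fun a _ => rfl)
              _ = F := List.map_id F
          refine pvGoodFalses memo ((F.map (fun p => (p, false))).reverse) [] ((t, true) :: rest)
            ?_ ?_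
          · intro e he
            obtain ⟨p, _, rfl⟩ := List.mem_map.mp (List.mem_reverse.mp he)
            rfl
          · rwa [hrev]
        have hb' : ∀ e ∈ stack', 0 ≤ e.1 := by
          intro e he
          rw [hstack'] at he
          rcases List.mem_append.mp he with he | he
          · obtain ⟨p, hp, rfl⟩ := List.mem_map.mp (List.mem_reverse.mp he)
            exact (pvBPredsMem t p (List.mem_of_mem_filter hp)).1
          · rcases List.mem_cons.mp he with rfl | he
            · exact hb (t, false) List.mem_cons_self
            · exact hb e (List.mem_cons_of_mem _ he)
        have hlt : pvPhi memo stack' < pvPhi memo ((t, false) :: rest) := by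
          rw [hstack', hF]
          exact pvDecPush memo t rest hc
        obtain ⟨c1, c2, c3⟩ := ih memo stack' (by omega) ha h0 hg' hb'
        have hrun : bRun heights memo ((t, false) :: rest) = bRun heights memo stack' := by
          rw [bRun, dif_neg hc, dif_neg (by simp)]
        refine ⟨fun k hk => hrun ▸ c1 k hk, fun k v hv' => c2 k v (hrun ▸ hv'), ?_⟩
        intro x hx
        obtain ⟨b, hbx⟩ := hx
        rcases List.mem_cons.mp hbx with heq | hbx
        · have hxt : x = t := congrArg Prod.fst heq
          subst hxt
          refine hrun ▸ c3 x ⟨true, ?_⟩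
          rw [hstack']
          exact List.mem_append.mpr (Or.inr List.mem_cons_self)
        · refine hrun ▸ c3 x ⟨b, ?_⟩
          rw [hstack']
          exact List.mem_append.mpr (Or.inr (List.mem_cons_of_mem _ hbx))

theorem pvBRunSound (heights : List Int) (memo : PySem.Dict Int Int)
    (stack : List (Int × Bool))
    (ha : ∀ k v, memo.get? k = some v → ∃ m : Nat, k = (m : Int) ∧ v = dpS heights m)
    (h0 : memo.contains 0 = true)
    (hg : Good memo [] stack)
    (hb : ∀ e ∈ stack, 0 ≤ e.1) :
    (∀ k, memo.contains k = true → (bRun heights memo stack).contains k = true) ∧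
    (∀ k v, (bRun heights memo stack).get? k = some v →
      ∃ m : Nat, k = (m : Int) ∧ v = dpS heights m) ∧
    (∀ x, (∃ b, (x, b) ∈ stack) → (bRun heights memo stack).contains x = true) :=
  pvBRunSoundAux heights (pvPhi memo stack) memo stack le_rfl ha h0 hg hb

-- B computes the dp value at N-1
theorem pvBeq (N : Int) (heights : List Int) (h1 : 1 ≤ N) :
    minimal_energy_alt N heights = dpS heights (N - 1).toNat := by
  unfold minimal_energy_alt
  have hd0 : PySem.Dict.ofList [((0:Int), (0:Int))] = PySem.Dict.empty.insert 0 0 := by decide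
  have ha : ∀ k v, (PySem.Dict.ofList [((0:Int), (0:Int))]).get? k = some v →
      ∃ m : Nat, k = (m : Int) ∧ v = dpS heights m := by
    intro k v hkv
    rw [hd0, PySem.Dict.get?_insert] at hkv
    split at hkv
    · rename_i hk0
      refine ⟨0, hk0, ?_⟩
      injection hkv with h
      rw [← h]
      simp [dpS]
    · rw [PySem.Dict.get?_empty] at hkv
      cases hkv
  have h0 : (PySem.Dict.ofList [((0:Int), (0:Int))]).contains 0 = true := by decide
  have hgood : Good (PySem.Dict.ofList [((0:Int), (0:Int))]) [] [(N - 1, false)] :=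
    ⟨(fun h => nomatch h), trivial⟩
  have hbnd : ∀ e ∈ [(N - 1, false)], 0 ≤ e.1 := by
    intro e he
    rcases List.mem_singleton.mp he with rfl
    simp
    omega
  obtain ⟨c1, c2, c3⟩ := pvBRunSound heights (PySem.Dict.ofList [((0:Int), (0:Int))])
    [(N - 1, false)] ha h0 hgood hbnd
  have hcont := c3 (N - 1) ⟨false, List.mem_singleton.mpr rfl⟩
  have hsome : ((bRun heights (PySem.Dict.ofList [((0:Int), (0:Int))])
      [(N - 1, false)]).get? (N - 1)).isSome = true := by
    rw [← PySem.Dict.contains_eq_isSome_get?]; exact hcont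
  obtain ⟨v, hv⟩ := Option.isSome_iff_exists.mp hsome
  obtain ⟨m, hm, rfl⟩ := c2 _ _ hv
  rw [PySem.Dict.getD_of_get?_eq_some _ 0 hv, hm, Int.toNat_natCast]

-- ===== VERDICT (by name: the statement is the Claim_ definition above) =====
theorem minimal_energy_spec : Claim_equal_minimal_energy := by
  intro N heights _ hpre
  show minimal_energy N heights = minimal_energy_alt N heights
  rw [pvAeq N heights hpre.1, pvBeq N heights hpre.1]
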